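-- pv_equiv track=rewrite | github.com/Azure-Samples/azure-ai-content-understanding-python | python/di_to_cu_migration_tool/field_name_utils.py | normalize_field_name_simple
-- ===== SOURCE A (Python) =====
-- ALLOWED_CHARS = set('abcdefghijklmnopqrstuvwxyzABCDEFGHIJKLMNOPQRSTUVWXYZ0123456789_')
--
-- def normalize_field_name_simple(name: str) -> str:
--     """
--     Simple normalization function without tracking (for one-off normalizations).
--     Replaces invalid characters with underscores.
--
--     Args:
--         name (str): The field name to normalize.
--
--     Returns:
--         str: The normalized field name.
--
--     Note:
--         This function does NOT handle duplicates. Use FieldNameNormalizer class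
--         for full functionality including duplicate detection.
--     """
--     if not name:
--         return name
--
--     result = []
--     prev_was_underscore = False
--
--     for char in name:
--         if char in ALLOWED_CHARS:
--             prev_was_underscore = (char == '_')
--             result.append(char)
--         else:
--             if not prev_was_underscore:
--                 result.append('_')
--                 prev_was_underscore = True
--
--     normalized = ''.join(result).strip('_')
--
--     while '__' in normalized:
--         normalized = normalized.replace('__', '_')
--
--     # Ensure name starts with letter or underscore (not a number)
--     if normalized and normalized[0].isdigit():
--         normalized = 'f_' + normalized
--
--     return normalized
-- ===== SOURCE B (Python) =====
-- ALLOWED_CHARS = set('abcdefghijklmnopqrstuvwxyzABCDEFGHIJKLMNOPQRSTUVWXYZ0123456789_')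
--
-- def normalize_field_name_simple(name: str) -> str:
--     """Normalize a field name: mask disallowed chars with '_', then rebuild by
--     joining the nonempty '_'-separated pieces (this collapses runs and strips
--     leading/trailing underscores in one step)."""
--     masked = ''.join(c if c in ALLOWED_CHARS else '_' for c in name)
--     s = '_'.join(p for p in masked.split('_') if p)
--     if s and s[0].isdigit():
--         s = 'f_' + s
--     return s
-- ===== Notes on version B (the rewrite author's own statement) =====
-- stated objective: idiomatic
-- what changed: Replaces the per-char state-machine scan (prev_was_underscore flag) plus strip plus while-replace fixpoint that collapses double underscores with a single pipeline: mask every disallowed char to an underscore, split on underscore, drop the empty pieces, rejoin with single underscores.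
import Mathlib
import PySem

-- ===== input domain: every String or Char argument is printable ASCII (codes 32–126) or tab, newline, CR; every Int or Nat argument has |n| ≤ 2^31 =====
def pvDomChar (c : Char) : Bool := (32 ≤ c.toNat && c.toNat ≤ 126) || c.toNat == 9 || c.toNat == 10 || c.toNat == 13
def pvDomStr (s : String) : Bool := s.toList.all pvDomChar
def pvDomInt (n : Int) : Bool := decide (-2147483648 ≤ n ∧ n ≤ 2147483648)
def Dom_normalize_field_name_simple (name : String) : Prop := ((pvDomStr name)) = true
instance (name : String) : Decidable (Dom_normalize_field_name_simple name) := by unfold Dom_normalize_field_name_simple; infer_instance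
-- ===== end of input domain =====

-- B replaces A's per-char state-machine scan + strip + while-replace fixpoint by a
-- mask / split-on-underscore / drop-empty-pieces / rejoin pipeline; proved to return the same string.

-- ===== PORT A =====
def pvALLOWED : PySem.Set Char :=
  PySem.Set.ofList "abcdefghijklmnopqrstuvwxyzABCDEFGHIJKLMNOPQRSTUVWXYZ0123456789_".toList

-- structural characterisation of one replace('__','_') pass; cited by pvCollapse's termination proof
def pvR : List Char → List Char
  | [] => []
  | [c] => [c]
  | c :: d :: t => if c = '_' ∧ d = '_' then '_' :: pvR t else c :: pvR (d :: t)

theorem pvR_go (fuel : Nat) : ∀ (l acc : List Char), l.length ≤ fuel →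
    PySem.Chars.replace.go ['_','_'] ['_'] fuel l acc = acc.reverse ++ pvR l := by
  induction fuel with
  | zero =>
    intro l acc h
    have : l = [] := List.eq_nil_of_length_eq_zero (Nat.le_zero.mp h)
    subst this
    simp [PySem.Chars.replace.go, pvR]
  | succ n ih =>
    intro l acc h
    match l with
    | [] => simp [PySem.Chars.replace.go, pvR]
    | [c] =>
      have hpre : (['_','_'].isPrefixOf [c]) = false := by
        simp [List.isPrefixOf]
      rw [PySem.Chars.replace.go]
      simp only [hpre, Bool.false_eq_true, if_false]
      rw [ih [] (c :: acc) (by simp)]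
      simp [pvR]
    | c :: d :: t =>
      rw [PySem.Chars.replace.go]
      by_cases hcd : c = '_' ∧ d = '_'
      · have hpre : (['_','_'].isPrefixOf (c :: d :: t)) = true := by
          simp [List.isPrefixOf, hcd.1, hcd.2]
        simp only [hpre, if_true, List.length_cons, List.length_nil, List.drop_succ_cons,
          List.drop_zero, List.reverse_cons, List.reverse_nil, List.nil_append, List.singleton_append]
        rw [ih t ('_' :: acc) (by simp at h ⊢; omega)]
        simp [pvR, hcd]
      · have hpre : (['_','_'].isPrefixOf (c :: d :: t)) = false := by
          rcases not_and_or.mp hcd with h' | h' <;> simp [List.isPrefixOf] <;> intro e <;> simp_all [eq_comm]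
        simp only [hpre, Bool.false_eq_true, if_false]
        rw [ih (d :: t) (c :: acc) (by simp at h ⊢; omega)]
        simp [pvR, hcd]

theorem pvReplace_eq_pvR (cs : List Char) :
    PySem.Chars.replace cs ['_','_'] ['_'] = pvR cs := by
  rw [PySem.Chars.replace]
  simp only [List.isEmpty_cons, Bool.false_eq_true, if_false]
  rw [pvR_go cs.length cs [] (le_refl _)]
  simp

theorem pvR_length_le (cs : List Char) : (pvR cs).length ≤ cs.length := by
  induction cs using pvR.induct with
  | case1 => simp [pvR]
  | case2 c => simp [pvR]
  | case3 c d t hcd ih => simp [pvR, hcd]; omega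
  | case4 c d t hcd ih => simp [pvR, hcd]; simpa using ih

theorem pvR_length_lt (cs : List Char) (h : ['_','_'] <:+: cs) :
    (pvR cs).length < cs.length := by
  induction cs using pvR.induct with
  | case1 => simp at h
  | case2 c =>
    have := h.length_le
    simp at this
  | case3 c d t hcd ih =>
    have := pvR_length_le t
    simp [pvR, hcd]
    omega
  | case4 c d t hcd ih =>
    rcases List.infix_cons_iff.mp h with h' | h'
    · rcases (List.cons_prefix_cons.mp h') with ⟨e1, h''⟩
      rcases (List.cons_prefix_cons.mp h'') with ⟨e2, _⟩
      exact absurd ⟨e1.symm, e2.symm⟩ hcd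
    · have := ih h'
      simp [pvR, hcd]
      simpa using this

def pvCollapse (cs : List Char) : List Char :=
  if h : PySem.Chars.isIn ['_','_'] cs = true then
    pvCollapse (PySem.Chars.replace cs ['_','_'] ['_'])
  else cs
termination_by cs.length
decreasing_by
  rw [pvReplace_eq_pvR]
  exact pvR_length_lt _ ((PySem.Chars.isIn_iff_infix _ _).mp h)

def normalize_field_name_simple (name : String) : String :=
  if name.toList.isEmpty then name
  else
    match pvCollapse (PySem.Chars.stripChars
      (name.toList.foldl
        (fun (st : List Char × Bool) c =>
          if PySem.Set.contains pvALLOWED c then (st.1 ++ [c], c == '_')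
          else if !st.2 then (st.1 ++ ['_'], true) else st)
        ([], false)).1 ['_']) with
    | [] => String.ofList []
    | c :: t => if PySem.Chars.isdigit c then String.ofList ('f' :: '_' :: c :: t) else String.ofList (c :: t)

-- ===== PORT B =====
def normalize_field_name_simple_alt (name : String) : String :=
  match List.intercalate ['_']
      (((name.toList.map (fun c => if PySem.Set.contains pvALLOWED c then c else '_')).splitOn
        '_').filter (fun p => !p.isEmpty)) with
  | [] => String.ofList []
  | c :: t => if PySem.Chars.isdigit c then String.ofList ('f' :: '_' :: c :: t) else String.ofList (c :: t)

-- ===== PRECONDITION & SPEC =====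
def Spec_normalize_field_name_simple (name : String) (out : String) : Prop := out = normalize_field_name_simple_alt name
instance (name : String) (out : String) : Decidable (Spec_normalize_field_name_simple name out) := by unfold Spec_normalize_field_name_simple; infer_instance

-- ===== CLAIM (what is proved, stated in full; the proofs are below) =====
def Claim_equal_normalize_field_name_simple : Prop := ∀ (name : String), Dom_normalize_field_name_simple name → Spec_normalize_field_name_simple name (normalize_field_name_simple name)

-- ===== LEMMAS AND PROOFS =====

-- the masked string (B's first pass)
def pvMask (l : List Char) : List Char :=
  l.map (fun c => if PySem.Set.contains pvALLOWED c then c else '_')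

-- A's scan loop, as a left-to-right recursion
def pvScan : List Char → Bool → List Char
  | [], _ => []
  | c :: t, b =>
    if PySem.Set.contains pvALLOWED c then c :: pvScan t (c == '_')
    else if b then pvScan t true else '_' :: pvScan t true

-- the '_'-separated nonempty blocks of a list
def pvBlocks (X : List Char) : List (List Char) :=
  (X.splitOn '_').filter (fun p => !p.isEmpty)

-- "starts with an underscore (or is empty)"
def pvHE (X : List Char) : Prop := X = [] ∨ X.head? = some '_'


theorem pvSp_cons (c : Char) (t : List Char) :
    (c :: t).splitOn '_' =
      if c = '_' then [] :: t.splitOn '_' else (t.splitOn '_').modifyHead (c :: ·) := by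
  show List.splitOnP (fun x => x == '_') (c :: t) = _
  rw [List.splitOnP_cons]
  simp only [beq_iff_eq]
  rfl

theorem pvSp_head_empty (X : List Char) : ((X.splitOn '_').head? = some []) ↔ pvHE X := by
  cases X with
  | nil => simp [List.splitOn, List.splitOnP_nil, pvHE]
  | cons c t =>
    rw [pvSp_cons]
    by_cases hc : c = '_'
    · simp [hc, pvHE]
    · obtain ⟨h, tl, hsp⟩ := List.exists_cons_of_ne_nil (List.splitOnP_ne_nil (fun x => x == '_') t)
      have : t.splitOn '_' = h :: tl := hsp
      simp [hc, this, pvHE]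

theorem pvB_cons_u (X : List Char) : pvBlocks ('_' :: X) = pvBlocks X := by
  simp [pvBlocks, pvSp_cons]

theorem pvB_cons_c (c : Char) (hc : c ≠ '_') (X : List Char) :
    ∃ h tl, X.splitOn '_' = h :: tl ∧
      pvBlocks (c :: X) = (c :: h) :: tl.filter (fun p => !p.isEmpty) ∧
      pvBlocks X = (if h.isEmpty then [] else [h]) ++ tl.filter (fun p => !p.isEmpty) := by
  obtain ⟨h, tl, hsp⟩ := List.exists_cons_of_ne_nil (List.splitOnP_ne_nil (fun x => x == '_') X)
  have hsp : X.splitOn '_' = h :: tl := hsp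
  refine ⟨h, tl, hsp, ?_, ?_⟩
  · simp [pvBlocks, pvSp_cons, hc, hsp]
  · by_cases he : h.isEmpty <;> simp_all [pvBlocks, List.isEmpty_iff]

theorem pvB_merge (c : Char) (hc : c ≠ '_') {X Y : List Char}
    (h1 : pvBlocks X = pvBlocks Y) (h2 : pvHE X ↔ pvHE Y) :
    pvBlocks (c :: X) = pvBlocks (c :: Y) := by
  obtain ⟨hX, tX, hspX, hbX, hbX'⟩ := pvB_cons_c c hc X
  obtain ⟨hY, tY, hspY, hbY, hbY'⟩ := pvB_cons_c c hc Y
  have hhe : hX.isEmpty = hY.isEmpty := by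
    have eX := pvSp_head_empty X
    have eY := pvSp_head_empty Y
    rw [hspX] at eX; rw [hspY] at eY
    simp only [List.head?_cons, Option.some_inj] at eX eY
    by_cases h : hX.isEmpty
    · have : pvHE Y := h2.mp (eX.mp (List.isEmpty_iff.mp h))
      simp [List.isEmpty_iff, eY.mpr this, h]
    · by_cases h' : hY.isEmpty
      · exact absurd (h2.mpr (eY.mp (List.isEmpty_iff.mp h'))) (fun hh => h (by simp [List.isEmpty_iff, eX.mpr hh]))
      · simp [h, h']
  rw [hbX, hbY]
  rw [hbX', hbY', hhe] at h1
  by_cases h : hY.isEmpty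
  · simp [h] at h1
    have : hX = [] := List.isEmpty_iff.mp (hhe ▸ h)
    have hY0 : hY = [] := List.isEmpty_iff.mp h
    rw [this, hY0, h1]
  · simp [h] at h1
    rw [h1.1, h1.2]

-- A's loop body as a named function (definitionally the foldl lambda of the port)
def pvStep (st : List Char × Bool) (c : Char) : List Char × Bool :=
  if PySem.Set.contains pvALLOWED c then (st.1 ++ [c], c == '_')
  else if !st.2 then (st.1 ++ ['_'], true) else st

theorem pvStepFoldl_eq_scan (l : List Char) : ∀ (acc : List Char) (b : Bool),
    (l.foldl pvStep (acc, b)).1 = acc ++ pvScan l b := by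
  induction l with
  | nil => intro acc b; simp [pvScan]
  | cons c t ih =>
    intro acc b
    rw [List.foldl_cons]
    by_cases hc : c ∈ pvALLOWED
    · have hstep : pvStep (acc, b) c = (acc ++ [c], c == '_') := by simp [pvStep, hc]
      rw [hstep, ih]
      simp [pvScan, hc]
    · cases b with
      | false =>
        have hstep : pvStep (acc, false) c = (acc ++ ['_'], true) := by simp [pvStep, hc]
        rw [hstep, ih]
        simp [pvScan, hc]
      | true =>
        have hstep : pvStep (acc, true) c = (acc, true) := by simp [pvStep, hc]
        rw [hstep, ih]
        simp [pvScan, hc]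

theorem pvFoldl_eq_scan (l : List Char) (acc : List Char) (b : Bool) :
    (l.foldl
      (fun (st : List Char × Bool) c =>
        if PySem.Set.contains pvALLOWED c then (st.1 ++ [c], c == '_')
        else if !st.2 then (st.1 ++ ['_'], true) else st)
      (acc, b)).1 = acc ++ pvScan l b := by
  change (l.foldl pvStep (acc, b)).1 = _
  exact pvStepFoldl_eq_scan l acc b

theorem pvInv (l : List Char) : ∀ (b : Bool),
    pvBlocks (pvScan l b) = pvBlocks (pvMask l)
    ∧ (pvHE (pvScan l b) → pvHE (pvMask l))
    ∧ (b = false → (pvHE (pvMask l) → pvHE (pvScan l b))) := by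
  induction l with
  | nil => intro b; simp [pvScan, pvMask]
  | cons c t ih =>
    intro b
    by_cases hc : c ∈ pvALLOWED
    · by_cases hu : c = '_'
      · subst hu
        have hs : pvScan ('_' :: t) b = '_' :: pvScan t true := by simp [pvScan, hc]
        have hm : pvMask ('_' :: t) = '_' :: pvMask t := by simp [pvMask, hc]
        refine ⟨?_, ?_, ?_⟩
        · rw [hs, hm, pvB_cons_u, pvB_cons_u]; exact (ih true).1
        · intro _; rw [hm]; right; rfl
        · intro _ _; rw [hs]; right; rfl
      · have hs : pvScan (c :: t) b = c :: pvScan t false := by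
          have hb : (c == '_') = false := by simp [hu]
          simp [pvScan, hc, hb]
        have hm : pvMask (c :: t) = c :: pvMask t := by simp [pvMask, hc]
        obtain ⟨ih1, ih2, ih3⟩ := ih false
        refine ⟨?_, ?_, ?_⟩
        · rw [hs, hm]
          exact pvB_merge c hu ih1 ⟨ih2, ih3 rfl⟩
        · intro h; rw [hs] at h; rcases h with h | h
          · exact absurd h (List.cons_ne_nil _ _)
          · simp at h; exact absurd h hu
        · intro _ h; rw [hm] at h; rcases h with h | h
          · exact absurd h (List.cons_ne_nil _ _)
          · simp at h; exact absurd h hu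
    · have hm : pvMask (c :: t) = '_' :: pvMask t := by simp [pvMask, hc]
      cases b with
      | true =>
        have hs : pvScan (c :: t) true = pvScan t true := by simp [pvScan, hc]
        refine ⟨?_, ?_, ?_⟩
        · rw [hs, hm, pvB_cons_u]; exact (ih true).1
        · intro _; rw [hm]; right; rfl
        · intro h; exact absurd h (by simp)
      | false =>
        have hs : pvScan (c :: t) false = '_' :: pvScan t true := by simp [pvScan, hc]
        refine ⟨?_, ?_, ?_⟩
        · rw [hs, hm, pvB_cons_u, pvB_cons_u]; exact (ih true).1
        · intro _; rw [hm]; right; rfl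
        · intro _ _; rw [hs]; right; rfl

theorem pvInter_cons (x : List Char) (xs : List (List Char)) :
    List.intercalate ['_'] (x :: xs) =
      x ++ (if xs = [] then [] else '_' :: List.intercalate ['_'] xs) := by
  cases xs with
  | nil => simp [List.intercalate]
  | cons y ys => simp [List.intercalate, List.intersperse]

theorem pvBlocks_nil_iff (X : List Char) : pvBlocks X = [] ↔ ∀ a ∈ X, a = '_' := by
  induction X with
  | nil => simp [pvBlocks, List.splitOn, List.splitOnP_nil]
  | cons c t ih =>
    by_cases hc : c = '_'
    · subst hc; rw [pvB_cons_u]; simp [ih]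
    · obtain ⟨h, tl, _, hb, _⟩ := pvB_cons_c c hc t
      rw [hb]
      simp [hc]

def pvDD : List Char → List Char
  | [] => []
  | [c] => [c]
  | c :: d :: t => if c = '_' ∧ d = '_' then pvDD (d :: t) else c :: pvDD (d :: t)

theorem pvR_head (X : List Char) : (pvR X).head? = X.head? := by
  induction X using pvR.induct with
  | case1 => simp [pvR]
  | case2 c => simp [pvR]
  | case3 c d t hcd ih => simp [pvR, hcd, hcd.1]
  | case4 c d t hcd ih => simp [pvR, hcd]

theorem pvDD_cons_c (c : Char) (hc : c ≠ '_') (t : List Char) :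
    pvDD (c :: t) = c :: pvDD t := by
  cases t with
  | nil => simp [pvDD]
  | cons d u => simp [pvDD, hc]

theorem pvDD_cons_u (t : List Char) :
    pvDD ('_' :: t) = if t.head? = some '_' then pvDD t else '_' :: pvDD t := by
  cases t with
  | nil => simp [pvDD]
  | cons d u =>
    by_cases hd : d = '_'
    · simp [pvDD, hd]
    · simp [pvDD, hd, Ne.symm hd]

theorem pvDD_noDD (X : List Char) (h : ¬ ['_','_'] <:+: X) : pvDD X = X := by
  induction X using pvDD.induct with
  | case1 => simp [pvDD]
  | case2 c => simp [pvDD]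
  | case3 c d t hcd ih =>
    exact absurd (List.infix_cons_iff.mpr (Or.inl (by simp [hcd.1, hcd.2, List.cons_prefix_cons]))) h
  | case4 c d t hcd ih =>
    rw [pvDD]
    simp only [hcd, if_false]
    rw [ih (fun h' => h (List.infix_cons_iff.mpr (Or.inr h')))]

theorem pvDD_R (X : List Char) : pvDD (pvR X) = pvDD X := by
  induction X using pvR.induct with
  | case1 => simp [pvR]
  | case2 c => simp [pvR]
  | case3 c d t hcd ih =>
    obtain ⟨hc, hd⟩ := hcd
    subst hc; subst hd
    rw [pvR]
    simp only [and_self, if_true]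
    rw [pvDD_cons_u, pvR_head, ih]
    have hdd : pvDD ('_' :: '_' :: t) = pvDD ('_' :: t) := by simp [pvDD]
    rw [hdd, pvDD_cons_u]
  | case4 c d t hcd ih =>
    rw [pvR]
    simp only [hcd, if_false]
    by_cases hc : c = '_'
    · subst hc
      have hd : ¬ d = '_' := fun h => hcd ⟨rfl, h⟩
      rw [pvDD_cons_u, pvR_head, pvDD_cons_u]
      simp only [List.head?_cons, Option.some_inj]
      simp [hd, ih]
    · rw [pvDD_cons_c c hc, pvDD_cons_c c hc, ih]

theorem pvLast_of_blocks_nil (X : List Char) (hne : X ≠ []) (h : pvBlocks X = []) :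
    X.getLast? = some '_' := by
  have hall := (pvBlocks_nil_iff X).mp h
  rw [List.getLast?_eq_some_getLast hne]
  exact congrArg some (hall _ (List.getLast_mem hne))

theorem pvG (Y : List Char) :
    pvDD Y = (if Y.head? = some '_' then ['_'] else [])
      ++ List.intercalate ['_'] (pvBlocks Y)
      ++ (if Y.getLast? = some '_' ∧ pvBlocks Y ≠ [] then ['_'] else []) := by
  induction Y using pvDD.induct with
  | case1 => simp [pvDD, pvBlocks, List.splitOn, List.splitOnP_nil, List.intercalate]
  | case2 c =>
    by_cases hc : c = '_'
    · subst hc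
      have hb : pvBlocks ['_'] = [] := by
        rw [pvB_cons_u]; simp [pvBlocks, List.splitOn, List.splitOnP_nil]
      simp [pvDD, hb, List.intercalate]
    · have hb : pvBlocks [c] = [[c]] := by
        simp [pvBlocks, pvSp_cons, hc, List.splitOn, List.splitOnP_nil]
      simp [pvDD, hb, hc, List.intercalate]
  | case3 c d t hcd ih =>
    obtain ⟨hc, hd⟩ := hcd
    subst hc; subst hd
    have he : pvDD ('_' :: '_' :: t) = pvDD ('_' :: t) := by simp [pvDD]
    rw [he, ih, pvB_cons_u ('_' :: t), List.getLast?_cons_cons]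
    simp [pvB_cons_u]
  | case4 c d t hcd ih =>
    have he : pvDD (c :: d :: t) = c :: pvDD (d :: t) := by
      rw [pvDD]; simp [hcd]
    by_cases hc : c = '_'
    · subst hc
      have hd : d ≠ '_' := fun h => hcd ⟨rfl, h⟩
      rw [he, ih, pvB_cons_u (d :: t), List.getLast?_cons_cons]
      simp [hd]
    · -- c ≠ '_'
      obtain ⟨h, tl, hsp, hb, hb'⟩ := pvB_cons_c c hc (d :: t)
      rw [he, ih, hb, pvInter_cons, List.getLast?_cons_cons, hb']
      by_cases hd : d = '_'
      · subst hd
        have hhe : h.isEmpty := by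
          have := (pvSp_head_empty ('_' :: t)).mpr (Or.inr (by simp))
          rw [hsp] at this
          simp only [List.head?_cons, Option.some_inj] at this
          simp [this]
        have h0 : h = [] := List.isEmpty_iff.mp hhe
        subst h0
        simp only [List.isEmpty_nil, if_true, List.nil_append]
        by_cases htl : tl.filter (fun p => !p.isEmpty) = []
        · have hlast : ('_' :: t).getLast? = some '_' := by
            apply pvLast_of_blocks_nil _ (by simp)
            rw [hb']
            simp [htl]
          simp [htl, hc, hlast, List.intercalate]
        · simp [htl, hc]
      · have hne : ¬ h.isEmpty := by
          intro hh
          have : pvHE (d :: t) := (pvSp_head_empty (d :: t)).mp (by rw [hsp]; simp [List.isEmpty_iff.mp hh])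
          rcases this with h' | h'
          · exact absurd h' (by simp)
          · simp at h'; exact hd h'
        simp only [hne, if_false, Bool.false_eq_true, List.singleton_append]
        rw [pvInter_cons]
        simp [hd, hc]

theorem pvDropWhile_blocks (X : List Char) :
    pvBlocks (X.dropWhile (fun c => c == '_')) = pvBlocks X := by
  induction X with
  | nil => rfl
  | cons c t ih =>
    by_cases hc : c = '_'
    · subst hc
      rw [List.dropWhile_cons_of_pos (by simp), ih, pvB_cons_u]
    · rw [List.dropWhile_cons_of_neg (by simp [hc])]

theorem pvDropWhile_head (X : List Char) :
    (X.dropWhile (fun c => c == '_')).head? ≠ some '_' := by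
  intro h
  have hne : X.dropWhile (fun c => c == '_') ≠ [] := by
    intro h0; rw [h0] at h; simp at h
  have := List.head_dropWhile_not (fun c => c == '_') hne
  rw [List.head?_eq_head hne] at h
  simp only [Option.some_inj] at h
  rw [h] at this
  simp at this

theorem pvRstrip_decomp (Z : List Char) :
    ∃ A B, Z = A ++ B ∧ (∀ x ∈ B, x = '_') ∧
      (List.dropWhile (fun c => c == '_') Z.reverse).reverse = A := by
  induction Z using List.reverseRecOn with
  | nil => exact ⟨[], [], by simp⟩
  | append_singleton Z' a ih =>
    by_cases ha : a = '_'
    · obtain ⟨A, B, h1, h2, h3⟩ := ih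
      subst ha
      refine ⟨A, B ++ ['_'], by rw [h1, List.append_assoc], ?_, ?_⟩
      · intro x hx
        rcases List.mem_append.mp hx with hx | hx
        · exact h2 x hx
        · simpa using hx
      · rw [List.reverse_append, List.reverse_singleton, List.singleton_append,
          List.dropWhile_cons_of_pos (by simp)]
        exact h3
    · refine ⟨Z' ++ [a], [], by simp, by simp, ?_⟩
      rw [List.reverse_append, List.reverse_singleton, List.singleton_append,
        List.dropWhile_cons_of_neg (by simp [ha])]
      simp

theorem pvBlocks_all_u (B : List Char) (h : ∀ x ∈ B, x = '_') : pvBlocks B = [] :=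
  (pvBlocks_nil_iff B).mpr h

theorem pvBlocks_append_us (A B : List Char) (h : ∀ x ∈ B, x = '_') :
    pvBlocks (A ++ B) = pvBlocks A := by
  induction A with
  | nil => simpa using pvBlocks_all_u B h
  | cons c t ih =>
    by_cases hc : c = '_'
    · subst hc
      rw [List.cons_append, pvB_cons_u, pvB_cons_u, ih]
    · rw [List.cons_append]
      refine pvB_merge c hc ih ?_
      constructor
      · intro hh
        rcases hh with hh | hh
        · rcases List.append_eq_nil_iff.mp hh with ⟨h1, _⟩
          exact Or.inl h1
        · cases t with
          | nil => exact Or.inl rfl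
          | cons d u => simp at hh; exact Or.inr (by simp [hh])
      · intro hh
        rcases hh with hh | hh
        · subst hh
          cases B with
          | nil => exact Or.inl rfl
          | cons b bs => exact Or.inr (by simp [h b (by simp)])
        · cases t with
          | nil => simp at hh
          | cons d u => simp at hh; exact Or.inr (by simp [hh])

theorem pvStripChars_u (s : List Char) :
    PySem.Chars.stripChars s ['_'] =
      (List.dropWhile (fun c => c == '_') ((List.dropWhile (fun c => c == '_') s).reverse)).reverse := by
  simp only [PySem.Chars.stripChars]
  have hp : (fun c : Char => List.contains ['_'] c) = (fun c : Char => c == '_') := by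
    funext c
    simp only [List.contains_cons, List.contains_nil, Bool.or_false]
  rw [hp]

theorem pvCollapse_eq_pvDD (X : List Char) : pvCollapse X = pvDD X := by
  rw [pvCollapse]
  by_cases h : PySem.Chars.isIn ['_','_'] X = true
  · rw [dif_pos h, pvReplace_eq_pvR, pvCollapse_eq_pvDD (pvR X)]
    exact pvDD_R X
  · rw [dif_neg h]
    exact (pvDD_noDD X ((PySem.Chars.isIn_eq_false_iff _ _).mp (by simpa using h))).symm
termination_by X.length
decreasing_by exact pvR_length_lt _ ((PySem.Chars.isIn_iff_infix _ _).mp h)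

theorem pvMain (name : String) :
    normalize_field_name_simple name = normalize_field_name_simple_alt name := by
  unfold normalize_field_name_simple normalize_field_name_simple_alt
  by_cases h0 : name.toList.isEmpty
  · rw [if_pos h0]
    have hl : name.toList = [] := List.isEmpty_iff.mp h0
    rw [hl]
    simp only [List.map_nil, List.splitOn, List.splitOnP_nil, List.filter, List.isEmpty_nil,
      Bool.not_true, List.intercalate]
    conv_lhs => rw [← String.ofList_toList (s := name), hl]
    rfl
  · rw [if_neg h0]
    have key : pvCollapse (PySem.Chars.stripChars
        (name.toList.foldl
          (fun (st : List Char × Bool) c =>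
            if PySem.Set.contains pvALLOWED c then (st.1 ++ [c], c == '_')
            else if !st.2 then (st.1 ++ ['_'], true) else st)
          ([], false)).1 ['_'])
        = List.intercalate ['_'] (((name.toList.map
            (fun c => if PySem.Set.contains pvALLOWED c then c else '_')).splitOn '_').filter
            (fun p => !p.isEmpty)) := by
      rw [pvFoldl_eq_scan name.toList [] false, List.nil_append]
      rw [pvStripChars_u]
      obtain ⟨A, B, hAB, hBu, hA⟩ :=
        pvRstrip_decomp ((pvScan name.toList false).dropWhile (fun c => c == '_'))
      rw [hA, pvCollapse_eq_pvDD A, pvG A]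
      have hhead : ¬ A.head? = some '_' := by
        cases hAeq : A with
        | nil => simp
        | cons a A' =>
          intro hcon
          apply pvDropWhile_head (pvScan name.toList false)
          rw [hAB, hAeq, List.cons_append, List.head?_cons] at *
          simpa using hcon
      have hlast : ¬ A.getLast? = some '_' := by
        rw [← hA, List.getLast?_reverse]
        exact pvDropWhile_head _
      rw [if_neg hhead, if_neg (by intro hcon; exact hlast hcon.1)]
      have hblocks : pvBlocks A = pvBlocks (pvMask name.toList) := by
        calc pvBlocks A
            = pvBlocks (A ++ B) := (pvBlocks_append_us A B hBu).symm
          _ = pvBlocks ((pvScan name.toList false).dropWhile (fun c => c == '_')) := by rw [← hAB]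
          _ = pvBlocks (pvScan name.toList false) := pvDropWhile_blocks _
          _ = pvBlocks (pvMask name.toList) := (pvInv name.toList false).1
      rw [List.nil_append, List.append_nil, hblocks]
      rfl
    rw [key]

-- ===== VERDICT (by name: the statement is the Claim_ definition above) =====
theorem normalize_field_name_simple_spec : Claim_equal_normalize_field_name_simple := by
  intro name _
  unfold Spec_normalize_field_name_simple
  exact pvMain name
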